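-- pv_equiv track=rewrite | github.com/m2ndla/iti0102-2022 | KT/kt1/exam.py | has_seven
-- ===== SOURCE A (Python) =====
-- def has_seven(nums):
--     """
--     Whether the list has three 7s and no repeated consecutive elements.
--
--     Given a list if ints, return True if the value 7 appears in the list exactly 3 times
--     and no consecutive elements have the same value.
--
--     has_seven([1, 2, 3]) => False
--     has_seven([7, 1, 7, 7]) => False
--     has_seven([7, 1, 7, 1, 7]) => True
--     has_seven([7, 1, 7, 1, 1, 7]) => False
--     """
--     if not nums:
--         return False
--     lst = []
--     if nums.count(7) == 3:
--         for num in nums: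
--             if not lst:
--                 lst.append(num)
--             elif num == lst[-1]:
--                 return False
--             else:
--                 lst.append(num)
--         return True
--     else:
--         return False
-- ===== SOURCE B (Python) =====
-- def has_seven(nums):
--     seven_count = 0
--     prev = object()  # sentinel, never equals an int
--     for n in nums:
--         if n == prev:
--             return False
--         if n == 7:
--             seven_count += 1
--         prev = n
--     return seven_count == 3
-- ===== Notes on version B (the rewrite author's own statement) =====
-- stated objective: alternative
-- what changed: Replaces A's two passes (nums.count(7) followed by a list-rebuilding duplicate check) with a single traversal maintaining a 7-counter and the previous element together, with no auxiliary list.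
import Mathlib
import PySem

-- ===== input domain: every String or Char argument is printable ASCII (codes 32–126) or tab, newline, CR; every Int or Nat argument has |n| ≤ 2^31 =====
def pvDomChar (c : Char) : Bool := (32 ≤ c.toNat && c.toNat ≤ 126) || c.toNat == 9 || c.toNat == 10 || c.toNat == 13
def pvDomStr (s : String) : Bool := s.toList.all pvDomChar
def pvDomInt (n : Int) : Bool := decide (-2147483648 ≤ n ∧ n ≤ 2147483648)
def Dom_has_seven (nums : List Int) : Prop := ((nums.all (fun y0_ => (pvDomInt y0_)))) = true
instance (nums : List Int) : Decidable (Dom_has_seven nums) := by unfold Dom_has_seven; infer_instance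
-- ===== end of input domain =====

-- B: one pass with a previous-element sentinel and a running 7-counter, instead of A's count(7) pass plus list-rebuilding loop; same values everywhere.
-- ===== PORT A =====
-- the for-loop of A: lst is the rebuilt list, lst[-1] is its last element
def hasSevenLoopA (lst : List Int) (nums : List Int) : Bool :=
  match nums with
  | [] => true
  | num :: rest =>
    if lst = [] then hasSevenLoopA (lst ++ [num]) rest
    else if num = lst.getLast! then false
    else hasSevenLoopA (lst ++ [num]) rest

def has_seven (nums : List Int) : Bool :=
  if nums = [] then false
  else if PySem.List.count nums 7 = 3 then hasSevenLoopA [] nums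
  else false

-- ===== PORT B =====
-- the for-loop of B: prev = none is the sentinel
def hasSevenLoopB (sevenCount : Int) (prev : Option Int) (nums : List Int) : Bool :=
  match nums with
  | [] => sevenCount == 3
  | n :: rest =>
    if some n = prev then false
    else hasSevenLoopB (if n = 7 then sevenCount + 1 else sevenCount) (some n) rest

def has_seven_alt (nums : List Int) : Bool :=
  hasSevenLoopB 0 none nums

-- ===== PRECONDITION & SPEC =====
def Spec_has_seven (nums : List Int) (out : Bool) : Prop := out = has_seven_alt nums
instance (nums : List Int) (out : Bool) : Decidable (Spec_has_seven nums out) := by unfold Spec_has_seven; infer_instance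

-- ===== CLAIM (what is proved, stated in full; the proofs are below) =====
def Claim_equal_has_seven : Prop := ∀ (nums : List Int), Dom_has_seven nums → Spec_has_seven nums (has_seven nums)

-- ===== LEMMAS AND PROOFS =====

-- 'no element equals prev and no two consecutive elements are equal'
def chainOk (prev : Option Int) (nums : List Int) : Bool :=
  match nums with
  | [] => true
  | n :: rest => if some n = prev then false else chainOk (some n) rest

theorem loopB_eq (nums : List Int) : ∀ (c : Int) (prev : Option Int),
    hasSevenLoopB c prev nums
      = if chainOk prev nums then decide (c + (PySem.List.count nums 7 : Int) = 3) else false := by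
  induction nums with
  | nil =>
    intro c prev
    simp only [hasSevenLoopB, chainOk, PySem.List.count, List.count_nil, Nat.cast_zero,
      add_zero, if_true]
    rw [Bool.eq_iff_iff]; simp
  | cons n rest ih =>
    intro c prev
    simp only [hasSevenLoopB, chainOk]
    by_cases h : some n = prev
    · simp [h]
    · simp only [h, if_neg h, if_false, ih]
      by_cases hc : chainOk (some n) rest = true
      · simp only [hc, if_pos hc]
        by_cases h7 : n = 7
        · simp [h7, PySem.List.count, List.count_cons]; congr 1; push_cast; ring_nf
        · simp [h7, PySem.List.count, List.count_cons, Ne.symm h7]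
      · simp [hc]

theorem loopA_eq (nums : List Int) : ∀ (lst : List Int), lst ≠ [] →
    hasSevenLoopA lst nums = chainOk (some lst.getLast!) nums := by
  induction nums with
  | nil => intro lst _; simp [hasSevenLoopA, chainOk]
  | cons n rest ih =>
    intro lst hne
    simp only [hasSevenLoopA, chainOk, if_neg hne]
    by_cases h : n = lst.getLast!
    · simp [h]
    · have h2 : ¬ some n = some lst.getLast! := by simpa using h
      rw [if_neg h, if_neg h2, ih (lst ++ [n]) (by simp)]
      congr 2
      simpa using List.getLast!_concat (l := lst) (a := n)

-- ===== VERDICT (by name: the statement is the Claim_ definition above) =====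
theorem has_seven_spec : Claim_equal_has_seven := by
  intro nums _
  unfold Spec_has_seven has_seven has_seven_alt
  rw [loopB_eq]
  cases nums with
  | nil => simp [chainOk, PySem.List.count]
  | cons n rest =>
    simp only [reduceCtorEq, if_false, hasSevenLoopA, List.nil_append]
    rw [loopA_eq rest [n] (by simp)]
    have hg : ([n] : List Int).getLast! = n := rfl
    rw [hg]
    simp only [chainOk, reduceCtorEq, if_false]
    by_cases hc : PySem.List.count (n :: rest) 7 = 3 <;>
      cases hch : chainOk (some n) rest <;>
        simp_all [PySem.List.count] <;> omega
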